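-- pv_equiv track=rewrite | github.com/cburst/CRAFT-Content-Restoration-Authorship-Familiarity-Test | hybrid-intruder-synonym.py | compute_quarters
-- ===== SOURCE A (Python) =====
-- NUM_INTRUDERS = 4            # one per quarter
--
-- MIN_QUARTER_SIZE = 2
--
-- def compute_quarters(n_sentences):
--     """
--     Dynamically compute quarters based on text length.
--
--     Rules:
--       - Minimum quarter size = MIN_QUARTER_SIZE
--       - Maximum quarters = NUM_INTRUDERS
--       - If text is too short, reduce number of quarters
--       - Each quarter must have at least MIN_QUARTER_SIZE sentences
--
--     Returns:
--         list of (start, end) index tuples (end-exclusive)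
--     """
--
--     if n_sentences < MIN_QUARTER_SIZE:
--         return []
--
--     # Maximum number of possible quarters given minimum size
--     max_possible_quarters = n_sentences // MIN_QUARTER_SIZE
--
--     # Cap by NUM_INTRUDERS
--     num_quarters = min(NUM_INTRUDERS, max_possible_quarters)
--
--     if num_quarters == 0:
--         return []
--
--     base_size = n_sentences // num_quarters
--     remainder = n_sentences % num_quarters
--
--     quarters = []
--     start = 0
--
--     for i in range(num_quarters):
--         size = base_size + (1 if i < remainder else 0)
--
--         # Enforce minimum size
--         if size < MIN_QUARTER_SIZE:
--             size = MIN_QUARTER_SIZE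
--
--         end = min(n_sentences, start + size)
--
--         if end - start >= MIN_QUARTER_SIZE:
--             quarters.append((start, end))
--
--         start = end
--
--     return quarters
-- ===== SOURCE B (Python) =====
-- NUM_INTRUDERS = 4
--
-- MIN_QUARTER_SIZE = 2
--
-- def compute_quarters(n_sentences):
--     if n_sentences < MIN_QUARTER_SIZE:
--         return []
--     num_quarters = min(NUM_INTRUDERS, n_sentences // MIN_QUARTER_SIZE)
--     base, rem = divmod(n_sentences, num_quarters)
--     return [(i * base + min(i, rem), (i + 1) * base + min(i + 1, rem))
--             for i in range(num_quarters)]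
-- ===== Notes on version B (the rewrite author's own statement) =====
-- stated objective: simpler
-- what changed: Replaces the running-start accumulator loop with its min-size and clamp branches (all dead under the function's own constraints) by a single comprehension of closed-form quarter boundaries start = i*base + min(i, rem), end = (i+1)*base + min(i+1, rem).
import Mathlib
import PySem

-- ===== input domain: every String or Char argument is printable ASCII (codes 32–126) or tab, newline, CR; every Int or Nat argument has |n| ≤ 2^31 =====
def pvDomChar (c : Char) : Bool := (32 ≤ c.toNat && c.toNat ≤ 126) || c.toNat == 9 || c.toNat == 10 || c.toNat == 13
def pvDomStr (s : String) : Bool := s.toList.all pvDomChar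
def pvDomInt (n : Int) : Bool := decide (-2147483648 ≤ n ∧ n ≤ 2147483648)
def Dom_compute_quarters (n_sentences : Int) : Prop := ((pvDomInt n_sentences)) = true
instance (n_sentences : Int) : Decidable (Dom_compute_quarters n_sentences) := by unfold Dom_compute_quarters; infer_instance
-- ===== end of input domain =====

-- B replaces A's running-start accumulator loop (with its dead min-size/clamp branches) by
-- closed-form quarter boundaries; objective: simpler.

-- ===== PORT A =====
-- A-side helper: the body of A's for-loop, as a step function of the (quarters, start) state.
def cq_step (n_sentences base_size remainder : Int)
    (st : List (Int × Int) × Int) (i : Int) : List (Int × Int) × Int :=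
  let size := base_size + (if i < remainder then (1:Int) else 0)
  let size := if size < 2 then 2 else size
  let e := min n_sentences (st.2 + size)
  ((if e - st.2 ≥ 2 then st.1 ++ [(st.2, e)] else st.1), e)

def compute_quarters (n_sentences : Int) : List (Int × Int) :=
  if n_sentences < 2 then []
  else
    let max_possible_quarters := PySem.Int.floordiv n_sentences 2
    let num_quarters := min 4 max_possible_quarters
    if num_quarters = 0 then []
    else
      let base_size := PySem.Int.floordiv n_sentences num_quarters
      let remainder := PySem.Int.mod n_sentences num_quarters
      ((PySem.List.pyRange 0 num_quarters 1).foldl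
        (cq_step n_sentences base_size remainder) ([], 0)).1

-- ===== PORT B =====
def compute_quarters_alt (n_sentences : Int) : List (Int × Int) :=
  if n_sentences < 2 then []
  else
    let num_quarters := min 4 (PySem.Int.floordiv n_sentences 2)
    let base := PySem.Int.floordiv n_sentences num_quarters
    let rem := PySem.Int.mod n_sentences num_quarters
    (PySem.List.pyRange 0 num_quarters 1).map
      (fun i => (i * base + min i rem, (i + 1) * base + min (i + 1) rem))

-- ===== PRECONDITION & SPEC =====
def Spec_compute_quarters (n_sentences : Int) (out : List (Int × Int)) : Prop := out = compute_quarters_alt n_sentences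
instance (n_sentences : Int) (out : List (Int × Int)) : Decidable (Spec_compute_quarters n_sentences out) := by unfold Spec_compute_quarters; infer_instance

-- ===== CLAIM (what is proved, stated in full; the proofs are below) =====
def Claim_equal_compute_quarters : Prop := ∀ (n_sentences : Int), Dom_compute_quarters n_sentences → Spec_compute_quarters n_sentences (compute_quarters n_sentences)

-- ===== LEMMAS AND PROOFS =====

-- Loop invariant: after processing 0..K-1 the start pointer is K*b + min K r and every
-- iteration appended its closed-form quarter (the clamp/min/size guards never fire, since
-- b ≥ 2 and the running end stays ≤ n).
theorem cq_fold_inv (n q b r : Int) (hb : 2 ≤ b) (hr0 : 0 ≤ r)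
    (hn : n = q * b + r) :
    ∀ K : Nat, (K : Int) ≤ q →
      List.foldl (cq_step n b r) ([], 0) ((List.range K).map (fun k : Nat => Int.ofNat k)) =
        ((List.range K).map
            (fun k : Nat => (Int.ofNat k * b + min (Int.ofNat k) r,
              (Int.ofNat k + 1) * b + min (Int.ofNat k + 1) r)),
          Int.ofNat K * b + min (Int.ofNat K) r) := by
  intro K
  induction K with
  | zero => intro _; simp; omega
  | succ K ih =>
    intro hK
    have hK' : (K : Int) < q := by push_cast at hK; omega
    rw [List.range_succ, List.map_append, List.map_append, List.foldl_append,
      ih (by omega)]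
    simp only [List.map_cons, List.map_nil, List.foldl_cons, List.foldl_nil, cq_step]
    have hmin1 : min ((K : Int)) r + (if (K : Int) < r then (1:Int) else 0) = min ((K : Int) + 1) r := by
      split_ifs <;> omega
    have hle : ((K : Int) + 1) * b + min ((K : Int) + 1) r ≤ n := by
      have : min ((K : Int) + 1) r ≤ r := by omega
      nlinarith
    simp only [Prod.mk.injEq, Int.ofNat_eq_natCast]
    push_cast
    have hexp : ((K : Int) + 1) * b = (K : Int) * b + b := by ring
    have hsz : ¬ (b + if (K : Int) < r then (1:Int) else 0) < 2 := by split_ifs <;> omega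
    rw [if_neg hsz]
    have h1 : (K : Int) * b + min (K : Int) r + (b + if (K : Int) < r then (1:Int) else 0) =
        ((K : Int) + 1) * b + min ((K : Int) + 1) r := by linarith [hexp, hmin1]
    have hmn : min n ((K : Int) * b + min (K : Int) r + (b + if (K : Int) < r then (1:Int) else 0)) =
        ((K : Int) + 1) * b + min ((K : Int) + 1) r := by rw [h1]; exact min_eq_right hle
    rw [hmn]
    rw [if_pos (by linarith [hexp, hmin1, hsz])]
    exact ⟨rfl, rfl⟩

-- ===== VERDICT (by name: the statement is the Claim_ definition above) =====
theorem compute_quarters_spec : Claim_equal_compute_quarters := by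
  intro n _
  show compute_quarters n = compute_quarters_alt n
  unfold compute_quarters compute_quarters_alt
  by_cases h2 : n < 2
  · simp [h2]
  · simp only [if_neg h2]
    set q : Int := min 4 (PySem.Int.floordiv n 2) with hqdef
    have hd2 : PySem.Int.floordiv n 2 = n / 2 := PySem.Int.floordiv_eq_ediv_of_pos (by omega)
    have hq1 : 1 ≤ q := by rw [hqdef, hd2]; omega
    have hqn : 2 * q ≤ n := by rw [hqdef, hd2]; omega
    have hfd : PySem.Int.floordiv n q = n / q := PySem.Int.floordiv_eq_ediv_of_pos (by omega)
    have hmd : PySem.Int.mod n q = n % q := PySem.Int.mod_eq_emod_of_pos (by omega)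
    have hq0 : ¬ q = 0 := by omega
    simp only [if_neg hq0, hfd, hmd]
    have hnbr : n = q * (n / q) + n % q := (Int.mul_ediv_add_emod n q).symm
    have hr0 : 0 ≤ n % q := Int.emod_nonneg n (by omega)
    have hrq : n % q < q := Int.emod_lt_of_pos n (by omega)
    have hb2 : 2 ≤ n / q := (Int.le_ediv_iff_mul_le (by omega)).mpr (by omega)
    rw [PySem.List.pyRange_one]
    have hKq : ((q.toNat : Int)) ≤ q := by omega
    have := cq_fold_inv n q (n / q) (n % q) hb2 hr0 hnbr q.toNat hKq
    simp only [sub_zero, zero_add, Int.ofNat_eq_natCast] at this ⊢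
    rw [this]
    simp [List.map_map, Function.comp_def]
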